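-- pv_equiv track=rewrite | github.com/cdpaiva/aoc | d02p2.py | check_subsequence
-- ===== SOURCE A (Python) =====
-- def check_subsequence(line, i, increasing):
--     line = line.copy()
--     line.pop(i)
--     deltas = [b - a for a, b in zip(line[:-1], line[1:])]
--     if increasing:
--         return all(d > 0 and d < 4 for d in deltas)
--     else:
--         return all(d < 0 and d > -4 for d in deltas)
-- ===== SOURCE B (Python) =====
-- def check_subsequence(line, i, increasing):
--     n = len(line)
--     j = i + n if i < 0 else i
--     if not (0 <= j < n):
--         raise IndexError("pop index out of range")
--     lo, hi = (0, 4) if increasing else (-4, 0)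
--     prev = None
--     for k, v in enumerate(line):
--         if k == j:
--             continue
--         if prev is not None:
--             d = v - prev
--             if not (lo < d < hi):
--                 return False
--         prev = v
--     return True
-- ===== Notes on version B (the rewrite author's own statement) =====
-- stated objective: faster
-- what changed: B makes one early-exit pass over the original list threading the previously kept value and skipping the normalised removal index, instead of copying the list, popping, building two slices and a deltas list then testing all of them.
import Mathlib
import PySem

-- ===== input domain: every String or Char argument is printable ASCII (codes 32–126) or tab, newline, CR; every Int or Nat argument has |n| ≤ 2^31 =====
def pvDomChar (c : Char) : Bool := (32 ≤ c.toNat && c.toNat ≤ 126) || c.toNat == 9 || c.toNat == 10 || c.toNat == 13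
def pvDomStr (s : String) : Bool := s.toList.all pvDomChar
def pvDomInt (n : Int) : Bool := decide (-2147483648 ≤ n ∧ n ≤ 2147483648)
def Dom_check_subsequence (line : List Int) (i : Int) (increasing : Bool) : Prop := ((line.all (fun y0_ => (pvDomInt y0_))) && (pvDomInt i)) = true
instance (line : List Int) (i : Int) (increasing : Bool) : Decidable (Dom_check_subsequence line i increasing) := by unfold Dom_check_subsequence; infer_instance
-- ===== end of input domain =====

-- B replaces copy/pop/slicing/deltas-list by one early-exit pass over the original
-- list that skips the normalised removal index and threads the previous kept value.
-- Equality of RETURN values is what is proved (A mutates only its local copy).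

-- ===== PORT A =====
def check_subsequence (line : List Int) (i : Int) (increasing : Bool) : Bool :=
  -- line = line.copy(); line.pop(i)  (Pre_ excludes the IndexError case: pop? = none)
  match PySem.List.pop? line i with
  | none => false
  | some (_, rest) =>
    let deltas := ((PySem.List.slice rest none (some (-1))).zip
                   (PySem.List.slice rest (some 1) none)).map (fun p => p.2 - p.1)
    if increasing then
      deltas.all (fun d => decide (d > 0 ∧ d < 4))
    else
      deltas.all (fun d => decide (d < 0 ∧ d > -4))

-- ===== PORT B =====
-- the for-loop of Source B: k counts positions, j is the index to skip, prev the last kept value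
def pvAltLoop (xs : List Int) (k j : Nat) (prev : Option Int) (lo hi : Int) : Bool :=
  match xs with
  | [] => true
  | v :: rest =>
    if k = j then pvAltLoop rest (k + 1) j prev lo hi
    else
      match prev with
      | none => pvAltLoop rest (k + 1) j (some v) lo hi
      | some p =>
        if lo < v - p ∧ v - p < hi then pvAltLoop rest (k + 1) j (some v) lo hi
        else false

def check_subsequence_alt (line : List Int) (i : Int) (increasing : Bool) : Bool :=
  let n : Int := line.length
  let j : Int := if i < 0 then i + n else i
  if 0 ≤ j ∧ j < n then
    let lohi : Int × Int := if increasing then (0, 4) else (-4, 0)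
    pvAltLoop line 0 j.toNat none lohi.1 lohi.2
  else false  -- Source B raises IndexError here; outside Pre_

-- ===== PRECONDITION & SPEC =====
-- excludes exactly the inputs where list.pop(i) raises IndexError (A returns nothing there)
def Pre_check_subsequence (line : List Int) (i : Int) (increasing : Bool) : Prop :=
  -(line.length : Int) ≤ i ∧ i < (line.length : Int)
instance (line : List Int) (i : Int) (increasing : Bool) : Decidable (Pre_check_subsequence line i increasing) := by unfold Pre_check_subsequence; infer_instance

def pvWitness_check_subsequence : List Int × Int × Bool := ([1, 2, 4, 3], 3, true)

def Spec_check_subsequence (line : List Int) (i : Int) (increasing : Bool) (out : Bool) : Prop := out = check_subsequence_alt line i increasing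
instance (line : List Int) (i : Int) (increasing : Bool) (out : Bool) : Decidable (Spec_check_subsequence line i increasing out) := by unfold Spec_check_subsequence; infer_instance

-- ===== CLAIM (what is proved, stated in full; the proofs are below) =====
def Claim_equal_check_subsequence : Prop := ∀ (line : List Int) (i : Int) (increasing : Bool), Dom_check_subsequence line i increasing → Pre_check_subsequence line i increasing → Spec_check_subsequence line i increasing (check_subsequence line i increasing)

-- ===== LEMMAS AND PROOFS =====

-- A's deltas-check on a list, as one recursion (characterisation of A's result)
def pvChk (prev : Option Int) (ys : List Int) (lo hi : Int) : Bool :=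
  match ys with
  | [] => true
  | v :: rest =>
    match prev with
    | none => pvChk (some v) rest lo hi
    | some p =>
      if lo < v - p ∧ v - p < hi then pvChk (some v) rest lo hi else false

theorem pvAltLoop_skip_ge (xs : List Int) (k j : Nat) (prev : Option Int) (lo hi : Int)
    (h : j < k) : pvAltLoop xs k j prev lo hi = pvChk prev xs lo hi := by
  induction xs generalizing k prev with
  | nil => rfl
  | cons v rest ih =>
    cases prev with
    | none =>
      simp only [pvAltLoop, pvChk, if_neg (show ¬ k = j by omega)]
      exact ih (k + 1) _ (by omega)
    | some p =>
      simp only [pvAltLoop, pvChk, if_neg (show ¬ k = j by omega)]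
      by_cases hb : lo < v - p ∧ v - p < hi
      · rw [if_pos hb, if_pos hb]; exact ih (k + 1) _ (by omega)
      · rw [if_neg hb, if_neg hb]

theorem pvAltLoop_eraseIdx (xs : List Int) (k j : Nat) (prev : Option Int) (lo hi : Int)
    (h : k ≤ j) : pvAltLoop xs k j prev lo hi = pvChk prev (xs.eraseIdx (j - k)) lo hi := by
  induction xs generalizing k prev with
  | nil => rfl
  | cons v rest ih =>
    by_cases hk : k = j
    · simp only [pvAltLoop, if_pos hk]
      have h0 : j - k = 0 := by omega
      rw [h0, List.eraseIdx_zero, List.tail_cons]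
      exact pvAltLoop_skip_ge rest (k + 1) j prev lo hi (by omega)
    · have hjk : j - k = (j - (k + 1)) + 1 := by omega
      rw [hjk, List.eraseIdx_cons_succ]
      cases prev with
      | none =>
        simp only [pvAltLoop, pvChk, if_neg hk]
        exact ih (k + 1) _ (by omega)
      | some p =>
        simp only [pvAltLoop, pvChk, if_neg hk]
        by_cases hb : lo < v - p ∧ v - p < hi
        · rw [if_pos hb, if_pos hb]; exact ih (k + 1) _ (by omega)
        · rw [if_neg hb, if_neg hb]

-- pvChk computes A's "all deltas in (lo,hi)" test
theorem pvChk_some (p : Int) (ys : List Int) (lo hi : Int) :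
    pvChk (some p) ys lo hi =
      ((p :: ys).dropLast.zip ys).all (fun q => decide (lo < q.2 - q.1 ∧ q.2 - q.1 < hi)) := by
  induction ys generalizing p with
  | nil => rfl
  | cons v rest ih =>
    simp only [pvChk]
    have hdl : (p :: v :: rest).dropLast = p :: (v :: rest).dropLast := by
      simp [List.dropLast_cons_of_ne_nil]
    rw [hdl, List.zip_cons_cons, List.all_cons, ih v]
    by_cases hb : lo < v - p ∧ v - p < hi
    · rw [if_pos hb]; simp [hb]
    · rw [if_neg hb]; simp [hb]

theorem pvChk_none (ys : List Int) (lo hi : Int) :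
    pvChk none ys lo hi =
      (ys.dropLast.zip ys.tail).all (fun q => decide (lo < q.2 - q.1 ∧ q.2 - q.1 < hi)) := by
  cases ys with
  | nil => rfl
  | cons v rest => simp only [pvChk, List.tail_cons]; exact pvChk_some v rest lo hi

-- pop under Pre_ : the popped value and the erased index
theorem pop?_of_pre (line : List Int) (i : Int)
    (h1 : -(line.length : Int) ≤ i) (h2 : i < (line.length : Int)) :
    ∃ v, PySem.List.pop? line i
        = some (v, line.eraseIdx (if i < 0 then i + line.length else i).toNat) := by
  have hlt : (if i < 0 then i + (line.length : Int) else i).toNat < line.length := by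
    split <;> omega
  have hidx : PySem.List.pyIdx? line.length i
      = some (if i < 0 then i + (line.length : Int) else i).toNat := by
    by_cases h0 : 0 ≤ i
    · rw [if_neg (by omega)]
      simp only [PySem.List.pyIdx?, if_pos h0, if_pos h2]
    · rw [if_pos (by omega)]
      simp only [PySem.List.pyIdx?, if_neg h0, if_pos h1, Option.some.injEq]
      omega
  exact ⟨line.get ⟨_, hlt⟩, by
    simp [PySem.List.pop?, hidx, List.getElem?_eq_getElem hlt]⟩

-- ===== VERDICT (by name: the statement is the Claim_ definition above) =====
theorem check_subsequence_spec : Claim_equal_check_subsequence := by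
  intro line i increasing _ hpre
  obtain ⟨h1, h2⟩ := hpre
  unfold Spec_check_subsequence check_subsequence check_subsequence_alt
  obtain ⟨v, hpop⟩ := pop?_of_pre line i h1 h2
  rw [hpop]
  set j : Int := if i < 0 then i + (line.length : Int) else i with hj
  have hjr : 0 ≤ j ∧ j < (line.length : Int) := by
    constructor <;> (rw [hj]; split <;> omega)
  rw [if_pos hjr]
  rw [pvAltLoop_eraseIdx line 0 j.toNat none _ _ (Nat.zero_le _)]
  simp only [Nat.sub_zero]
  rw [pvChk_none]
  rw [PySem.List.slice_to_neg_one, PySem.List.slice_from_one]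
  cases increasing with
  | true =>
    rw [if_pos rfl, if_pos rfl]
    simp only [List.all_map, Function.comp_def]
  | false =>
    rw [if_neg (by simp), if_neg (by simp)]
    simp only [List.all_map, Function.comp_def]
    congr 1; funext q
    simp only [decide_eq_decide]
    constructor <;> (intro hq; omega)
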